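-- pv_equiv track=rewrite | github.com/raeez/chiral-bar-cobar | compute/lib/theorem_admissible_sl3_libar_engine.py | pbw_character_sl3
-- ===== SOURCE A (Python) =====
-- from typing import Dict, List, Optional, Tuple, Set, Any
--
-- DIM_G = 8
--
-- def pbw_character_sl3(max_weight: int = 10) -> Dict[int, int]:
--     """PBW character of V_k(sl_3).
--
--     dim(V_k)_n = coefficient of q^n in prod_{m >= 1} (1 - q^m)^{-8}.
--     Computed via the colored partition recursion.
--     """
--     c_colors = DIM_G  # 8
--     p = [0] * (max_weight + 1)
--     p[0] = 1
--     for n in range(1, max_weight + 1):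
--         s = 0
--         for m in range(1, n + 1):
--             sigma = sum(d for d in range(1, m + 1) if m % d == 0)
--             s += sigma * c_colors * p[n - m]
--         p[n] = s // n
--     return {n: p[n] for n in range(max_weight + 1)}
-- ===== SOURCE B (Python) =====
-- def pbw_character_sl3(max_weight: int = 10):
--     """PBW character of V_k(sl_3), computed with a sum-of-divisors sieve
--     (O(N log N)) feeding the colored-partition recursion (O(N^2))."""
--     N = max_weight
--     sig = [0] * (N + 1)
--     for d in range(1, N + 1):
--         for j in range(d, N + 1, d):
--             sig[j] += d
--     p = [1]
--     for n in range(1, N + 1):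
--         s = sum(sig[m] * 8 * p[n - m] for m in range(1, n + 1))
--         p.append(s // n)
--     return {n: v for n, v in enumerate(p)}
-- ===== Notes on version B (the rewrite author's own statement) =====
-- stated objective: faster
-- what changed: B precomputes all sum-of-divisors values sigma(m) with a single multiples sieve (removing A's per-term O(m) divisor scan) and builds the coefficient table by appending instead of writing into a preallocated zero array.
import Mathlib
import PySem

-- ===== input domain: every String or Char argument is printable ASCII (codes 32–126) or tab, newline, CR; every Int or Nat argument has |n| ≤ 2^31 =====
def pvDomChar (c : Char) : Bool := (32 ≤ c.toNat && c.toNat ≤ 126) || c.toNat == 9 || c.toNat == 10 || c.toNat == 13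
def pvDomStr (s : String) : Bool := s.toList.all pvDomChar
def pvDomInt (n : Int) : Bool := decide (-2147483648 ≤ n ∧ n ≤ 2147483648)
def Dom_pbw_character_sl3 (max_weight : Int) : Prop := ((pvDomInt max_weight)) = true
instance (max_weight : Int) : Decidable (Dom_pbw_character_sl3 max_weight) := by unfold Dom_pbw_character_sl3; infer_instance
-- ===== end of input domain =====

-- B replaces A's per-term O(m) divisor scan by a one-shot sum-of-divisors sieve and
-- builds the table by appending; objective: faster (O(N^2 + N log N) instead of O(N^3)).

-- ===== PORT A =====
def pbw_character_sl3 (max_weight : Int) : List (Int × Int) :=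
  let c_colors : Int := 8
  let p0 : List Int :=
    PySem.List.pySetD (List.replicate ((max_weight + 1).toNat) 0) 0 1
  let p := (PySem.List.pyRange 1 (max_weight + 1) 1).foldl (fun p n =>
      let s := (PySem.List.pyRange 1 (n + 1) 1).foldl (fun s m =>
          let sigma := (PySem.List.pyRange 1 (m + 1) 1).foldl
              (fun acc d => if PySem.Int.mod m d = 0 then acc + d else acc) 0
          s + sigma * c_colors * PySem.List.pyGetD p (n - m) 0) 0
      PySem.List.pySetD p n (PySem.Int.floordiv s n)) p0
  (PySem.List.pyRange 0 (max_weight + 1) 1).map (fun n => (n, PySem.List.pyGetD p n 0))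

-- ===== PORT B =====
def pbw_character_sl3_alt (max_weight : Int) : List (Int × Int) :=
  let N := max_weight
  let sig := (PySem.List.pyRange 1 (N + 1) 1).foldl (fun sig d =>
      (PySem.List.pyRange d (N + 1) d).foldl
        (fun sig j => PySem.List.pySetD sig j (PySem.List.pyGetD sig j 0 + d)) sig)
    (List.replicate ((N + 1).toNat) 0)
  let p := (PySem.List.pyRange 1 (N + 1) 1).foldl (fun p n =>
      let s := (PySem.List.pyRange 1 (n + 1) 1).foldl (fun s m =>
          s + PySem.List.pyGetD sig m 0 * 8 * PySem.List.pyGetD p (n - m) 0) 0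
      p ++ [PySem.Int.floordiv s n]) [1]
  PySem.List.enumerate p 0

-- ===== PRECONDITION & SPEC =====
-- Python A raises IndexError (p[0]=1 on an empty list) for max_weight < 0.
def Pre_pbw_character_sl3 (max_weight : Int) : Prop := 0 ≤ max_weight
instance (max_weight : Int) : Decidable (Pre_pbw_character_sl3 max_weight) := by
  unfold Pre_pbw_character_sl3; infer_instance
def pvWitness_pbw_character_sl3 : Int := (4)

def Spec_pbw_character_sl3 (max_weight : Int) (out : List (Int × Int)) : Prop := out = pbw_character_sl3_alt max_weight
instance (max_weight : Int) (out : List (Int × Int)) : Decidable (Spec_pbw_character_sl3 max_weight out) := by unfold Spec_pbw_character_sl3; infer_instance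

-- ===== CLAIM (what is proved, stated in full; the proofs are below) =====
def Claim_equal_pbw_character_sl3 : Prop := ∀ (max_weight : Int), Dom_pbw_character_sl3 max_weight → Pre_pbw_character_sl3 max_weight → Spec_pbw_character_sl3 max_weight (pbw_character_sl3 max_weight)


-- ===== LEMMAS AND PROOFS =====

-- proof-side names for the loop bodies of the two ports
def bumpStep (d : Int) : List Int → Int → List Int :=
  fun L j => PySem.List.pySetD L j (PySem.List.pyGetD L j 0 + d)

def sieveStep (N : Int) : List Int → Int → List Int :=
  fun sig d => (PySem.List.pyRange d (N + 1) d).foldl (bumpStep d) sig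

def sieveL (N : Nat) : List Int :=
  (PySem.List.pyRange 1 ((N : Int) + 1) 1).foldl (sieveStep (N : Int)) (List.replicate (N + 1) 0)

def bodyA (p : List Int) (n : Int) : List Int :=
  PySem.List.pySetD p n (PySem.Int.floordiv
    ((PySem.List.pyRange 1 (n + 1) 1).foldl (fun s m =>
      s + (PySem.List.pyRange 1 (m + 1) 1).foldl
            (fun acc d => if PySem.Int.mod m d = 0 then acc + d else acc) 0 * 8 *
          PySem.List.pyGetD p (n - m) 0) 0) n)

def bodyB (sig : List Int) (p : List Int) (n : Int) : List Int :=
  p ++ [PySem.Int.floordiv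
    ((PySem.List.pyRange 1 (n + 1) 1).foldl (fun s m =>
      s + PySem.List.pyGetD sig m 0 * 8 * PySem.List.pyGetD p (n - m) 0) 0) n]

def pA (N K : Nat) : List Int :=
  (PySem.List.pyRange 1 ((K : Int) + 1) 1).foldl bodyA
    (PySem.List.pySetD (List.replicate (N + 1) 0) 0 1)

def pB (N K : Nat) : List Int :=
  (PySem.List.pyRange 1 ((K : Int) + 1) 1).foldl (bodyB (sieveL N)) [1]

def divTerm (i : Int) (d : Int) : Int := if d ∣ i ∧ d ≤ i then d else 0

lemma bump_length (d : Int) (js : List Int) (L : List Int) :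
    (js.foldl (bumpStep d) L).length = L.length := by
  induction js generalizing L with
  | nil => rfl
  | cons j js ih => simp [List.foldl_cons, ih, bumpStep, PySem.List.length_pySetD]

lemma bump_getD (d : Int) (js : List Int) (L : List Int)
    (hb : ∀ j ∈ js, 0 ≤ j ∧ j < (L.length : Int)) (hnd : js.Nodup)
    (i : Nat) (hi : i < L.length) :
    (js.foldl (bumpStep d) L).getD i 0 = L.getD i 0 + if (i : Int) ∈ js then d else 0 := by
  induction js generalizing L with
  | nil => simp
  | cons j js ih =>
    obtain ⟨hj0, hjlt⟩ := hb j List.mem_cons_self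
    rw [List.nodup_cons] at hnd
    have hjn : j.toNat < L.length := by omega
    have hset : bumpStep d L j = L.set j.toNat (L[j.toNat] + d) := by
      show PySem.List.pySetD L j (PySem.List.pyGetD L j 0 + d) = _
      rw [PySem.List.pySetD_of_nonneg _ _ hj0,
          PySem.List.pyGetD_eq_getElem _ _ hj0 (by exact_mod_cast hjlt)]
    rw [List.foldl_cons, hset,
        ih _ (fun x hx => by simpa [List.length_set] using hb x (List.mem_cons_of_mem _ hx))
          hnd.2 (by simpa [List.length_set] using hi)]
    have hi' : i < (L.set j.toNat (L[j.toNat] + d)).length := by simpa [List.length_set] using hi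
    by_cases hij : i = j.toNat
    · have hiz : (i : Int) = j := by omega
      have hnotmem : ¬ ((i : Int) ∈ js) := by rw [hiz]; exact hnd.1
      rw [List.getD_eq_getElem _ _ hi', List.getD_eq_getElem _ _ hi]
      subst hij
      rw [List.getElem_set_self hi']
      simp [hiz, hnd.1]
    · have hiz : (i : Int) ≠ j := by omega
      rw [List.getD_eq_getElem _ _ hi', List.getD_eq_getElem _ _ hi,
          List.getElem_set_ne (fun h => hij h.symm) hi']
      simp [hiz]

lemma nodup_pyRange_pos (a b d : Int) (hd : 0 < d) : (PySem.List.pyRange a b d).Nodup := by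
  rw [PySem.List.pyRange_of_pos a b hd]
  refine List.Nodup.map ?_ List.nodup_range
  intro x y h
  have h2 : d * (x : Int) = d * (y : Int) := by linarith
  have := mul_left_cancel₀ (ne_of_gt hd) h2
  exact_mod_cast this

lemma sieve_inv (N K : Nat) :
    ((PySem.List.pyRange 1 ((K : Int) + 1) 1).foldl (sieveStep (N : Int))
        (List.replicate (N + 1) 0)).length = N + 1 ∧
    ∀ i : Nat, i < N + 1 →
      ((PySem.List.pyRange 1 ((K : Int) + 1) 1).foldl (sieveStep (N : Int))
          (List.replicate (N + 1) 0)).getD i 0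
        = ((PySem.List.pyRange 1 ((K : Int) + 1) 1).map (divTerm (i : Int))).sum := by
  induction K with
  | zero =>
    rw [show ((0 : Nat) : Int) + 1 = 1 by norm_num, PySem.List.pyRange_one_eq_nil le_rfl]
    simp
  | succ K ih =>
    rw [show ((K + 1 : Nat) : Int) + 1 = ((K : Int) + 1) + 1 by push_cast; ring,
        PySem.List.pyRange_one_succ_right (by omega : (1 : Int) ≤ (K : Int) + 1),
        List.foldl_append, List.foldl_cons, List.foldl_nil]
    set d : Int := (K : Int) + 1 with hd
    set L := (PySem.List.pyRange 1 ((K : Int) + 1) 1).foldl (sieveStep (N : Int))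
      (List.replicate (N + 1) 0) with hL
    have hlen : L.length = N + 1 := ih.1
    have hbody : sieveStep (N : Int) L d
        = (PySem.List.pyRange d ((N : Int) + 1) d).foldl (bumpStep d) L := rfl
    have hdpos : (0 : Int) < d := by omega
    constructor
    · rw [hbody, bump_length, hlen]
    · intro i hi
      rw [hbody, List.map_append, List.sum_append, List.map_cons, List.map_nil,
          bump_getD d _ L ?_ (nodup_pyRange_pos _ _ _ hdpos) i (by omega), ih.2 i hi]
      · congr 1
        have hmem : ((i : Int) ∈ PySem.List.pyRange d ((N : Int) + 1) d)
            ↔ (d ∣ (i : Int) ∧ d ≤ (i : Int)) := by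
          rw [PySem.List.mem_pyRange_iff_of_pos hdpos]
          constructor
          · rintro ⟨h1, h2, h3⟩
            refine ⟨?_, h1⟩
            have := dvd_add h3 (dvd_refl d)
            simpa using this
          · rintro ⟨h1, h2⟩
            exact ⟨h2, by omega, dvd_sub h1 (dvd_refl d)⟩
        rw [divTerm]
        simp only [List.sum_cons, List.sum_nil, add_zero]
        exact if_congr hmem rfl rfl
      · intro j hj
        rw [PySem.List.mem_pyRange_iff_of_pos hdpos] at hj
        refine ⟨by omega, ?_⟩
        rw [hlen]; push_cast; omega

lemma sigA_eq (N m : Nat) (h1 : 1 ≤ m) (h2 : m ≤ N) :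
    (PySem.List.pyRange 1 ((m : Int) + 1) 1).foldl
      (fun acc d => if PySem.Int.mod (m : Int) d = 0 then acc + d else acc) 0
    = ((PySem.List.pyRange 1 ((N : Int) + 1) 1).map (divTerm (m : Int))).sum := by
  rw [PySem.List.foldl_congr_mem _ _ (fun acc d => acc + (if PySem.Int.mod (m : Int) d = 0 then d else 0)) 0
        (fun acc x _ => by by_cases h : PySem.Int.mod (m : Int) x = 0 <;> simp [h]),
      PySem.List.foldl_add, zero_add,
      PySem.List.pyRange_one_append 1 ((m : Int) + 1) ((N : Int) + 1) (by omega) (by omega),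
      List.map_append, List.sum_append]
  have htail : ((PySem.List.pyRange ((m : Int) + 1) ((N : Int) + 1)).map (divTerm (m : Int))).sum = 0 := by
    refine List.sum_eq_zero fun x hx => ?_
    obtain ⟨d, hd, rfl⟩ := List.mem_map.mp hx
    rw [PySem.List.mem_pyRange_one] at hd
    rw [divTerm, if_neg (fun h => absurd h.2 (by omega))]
  rw [htail, add_zero]
  refine congrArg List.sum (List.map_congr_left fun d hd => ?_)
  rw [PySem.List.mem_pyRange_one] at hd
  rw [divTerm]
  refine if_congr ?_ rfl rfl
  rw [PySem.Int.mod_eq_zero_iff_dvd]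
  exact ⟨fun h => ⟨h, by omega⟩, fun h => h.1⟩

lemma sieveL_getD (N m : Nat) (h1 : 1 ≤ m) (h2 : m ≤ N) :
    (sieveL N).getD m 0
    = (PySem.List.pyRange 1 ((m : Int) + 1) 1).foldl
        (fun acc d => if PySem.Int.mod (m : Int) d = 0 then acc + d else acc) 0 := by
  rw [sigA_eq N m h1 h2]
  exact (sieve_inv N N).2 m (by omega)

lemma enumerate_eq_map (xs : List Int) (s : Int) :
    PySem.List.enumerate xs s
    = (List.range xs.length).map (fun (k : Nat) => (s + (k : Int), xs.getD k 0)) := by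
  induction xs generalizing s with
  | nil => simp [PySem.List.enumerate_nil]
  | cons x xs ih =>
    rw [PySem.List.enumerate_cons, ih, List.length_cons, List.range_succ_eq_map]
    simp only [List.map_cons, List.map_map, List.getD_cons_zero, add_zero, Nat.cast_zero]
    refine congrArg (_ :: ·) (List.map_congr_left fun k _ => ?_)
    simp only [Function.comp_apply, Nat.succ_eq_add_one, List.getD_cons_succ, Prod.mk.injEq]
    refine ⟨by push_cast; ring, trivial⟩

lemma main_inv (N K : Nat) (hK : K ≤ N) :
    (pA N K).length = N + 1 ∧ (pB N K).length = K + 1 ∧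
    ∀ i : Nat, i ≤ K → (pA N K).getD i 0 = (pB N K).getD i 0 := by
  induction K with
  | zero =>
    rw [pA, pB, show ((0 : Nat) : Int) + 1 = 1 by norm_num, PySem.List.pyRange_one_eq_nil le_rfl,
        List.foldl_nil, List.foldl_nil, List.replicate_succ,
        PySem.List.pySetD_of_nonneg _ _ le_rfl]
    refine ⟨by simp, rfl, fun i hi => ?_⟩
    interval_cases i
    rfl
  | succ K ih =>
    obtain ⟨hlA, hlB, hag⟩ := ih (by omega)
    have hrange : PySem.List.pyRange 1 (((K + 1 : Nat) : Int) + 1) 1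
        = PySem.List.pyRange 1 ((K : Int) + 1) 1 ++ [(K : Int) + 1] := by
      rw [show ((K + 1 : Nat) : Int) + 1 = ((K : Int) + 1) + 1 by push_cast; ring,
          PySem.List.pyRange_one_succ_right (by omega)]
    have hstepA : pA N (K + 1) = bodyA (pA N K) ((K : Int) + 1) := by
      rw [pA, pA, hrange, List.foldl_append]; rfl
    have hstepB : pB N (K + 1) = bodyB (sieveL N) (pB N K) ((K : Int) + 1) := by
      rw [pB, pB, hrange, List.foldl_append]; rfl
    have hs : (PySem.List.pyRange 1 (((K : Int) + 1) + 1) 1).foldl (fun s m =>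
          s + (PySem.List.pyRange 1 (m + 1) 1).foldl
                (fun acc d => if PySem.Int.mod m d = 0 then acc + d else acc) 0 * 8 *
              PySem.List.pyGetD (pA N K) (((K : Int) + 1) - m) 0) 0
        = (PySem.List.pyRange 1 (((K : Int) + 1) + 1) 1).foldl (fun s m =>
          s + PySem.List.pyGetD (sieveL N) m 0 * 8 *
              PySem.List.pyGetD (pB N K) (((K : Int) + 1) - m) 0) 0 := by
      refine PySem.List.foldl_congr_mem _ _ _ 0 (fun acc m hm => ?_)
      rw [PySem.List.mem_pyRange_one] at hm
      obtain ⟨mn, rfl⟩ : ∃ mn : Nat, m = (mn : Int) :=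
        ⟨m.toNat, (Int.toNat_of_nonneg (by omega)).symm⟩
      have hmn1 : 1 ≤ mn := by exact_mod_cast hm.1
      have hmnN : mn ≤ N := by omega
      have e1 : (PySem.List.pyRange 1 ((mn : Int) + 1) 1).foldl
            (fun acc d => if PySem.Int.mod (mn : Int) d = 0 then acc + d else acc) 0
          = PySem.List.pyGetD (sieveL N) (mn : Int) 0 := by
        rw [PySem.List.pyGetD_natCast, sieveL_getD N mn hmn1 hmnN]
      have e2 : PySem.List.pyGetD (pA N K) (((K : Int) + 1) - (mn : Int)) 0
          = PySem.List.pyGetD (pB N K) (((K : Int) + 1) - (mn : Int)) 0 := by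
        have ht : ((K : Int) + 1) - (mn : Int) = ((K + 1 - mn : Nat) : Int) := by omega
        rw [ht, PySem.List.pyGetD_natCast, PySem.List.pyGetD_natCast, hag (K + 1 - mn) (by omega)]
      rw [e1, e2]
    refine ⟨?_, ?_, ?_⟩
    · rw [hstepA, bodyA, PySem.List.length_pySetD, hlA]
    · rw [hstepB, bodyB, List.length_append, hlB]; rfl
    · intro i hi
      rw [hstepA, hstepB, bodyA, bodyB, hs]
      set v : Int := PySem.Int.floordiv
        ((PySem.List.pyRange 1 (((K : Int) + 1) + 1) 1).foldl (fun s m =>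
          s + PySem.List.pyGetD (sieveL N) m 0 * 8 *
              PySem.List.pyGetD (pB N K) (((K : Int) + 1) - m) 0) 0) ((K : Int) + 1) with hv
      have hcast : ((K : Int) + 1) = ((K + 1 : Nat) : Int) := by omega
      rw [hcast, PySem.List.pySetD_natCast]
      have hiN : i < (pA N K).length := by omega
      have hiN' : i < ((pA N K).set (K + 1) v).length := by rw [List.length_set]; omega
      by_cases hiK : i = K + 1
      · subst hiK
        rw [List.getD_eq_getElem _ _ hiN', List.getElem_set_self,
            List.getD_append_right _ _ _ _ (by omega), hlB]
        simp
      · rw [List.getD_eq_getElem _ _ hiN', List.getElem_set_ne (fun h => hiK h.symm) hiN',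
            ← List.getD_eq_getElem _ 0 hiN, hag i (by omega),
            List.getD_append _ _ _ _ (by omega)]

lemma portA_eq (N : Nat) :
    pbw_character_sl3 (N : Int)
    = (PySem.List.pyRange 0 ((N : Int) + 1) 1).map
        (fun n => (n, PySem.List.pyGetD (pA N N) n 0)) := by
  simp only [pbw_character_sl3, pA, show ((N : Int) + 1).toNat = N + 1 from by omega]
  rfl

lemma portB_eq (N : Nat) :
    pbw_character_sl3_alt (N : Int) = PySem.List.enumerate (pB N N) 0 := by
  simp only [pbw_character_sl3_alt, pB, sieveL, show ((N : Int) + 1).toNat = N + 1 from by omega]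
  rfl

lemma ports_agree (N : Nat) : pbw_character_sl3 (N : Int) = pbw_character_sl3_alt (N : Int) := by
  obtain ⟨hlA, hlB, hag⟩ := main_inv N N le_rfl
  rw [portA_eq, portB_eq, enumerate_eq_map, hlB,
      show ((N : Int) + 1) = ((N + 1 : Nat) : Int) by omega,
      PySem.List.pyRange_zero_natCast, List.map_map]
  refine List.map_congr_left fun k hk => ?_
  rw [List.mem_range] at hk
  simp only [Function.comp_apply, PySem.List.pyGetD_natCast, zero_add, Prod.mk.injEq]
  exact ⟨trivial, hag k (by omega)⟩

-- ===== VERDICT (by name: the statement is the Claim_ definition above) =====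
theorem pbw_character_sl3_spec : Claim_equal_pbw_character_sl3 := by
  intro mw _ hpre
  obtain ⟨N, rfl⟩ : ∃ N : Nat, mw = (N : Int) := ⟨mw.toNat, (Int.toNat_of_nonneg hpre).symm⟩
  exact (ports_agree N)
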